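-- pv_equiv track=rewrite | github.com/AbbyBos/AdventOfCode-2025 | Day 2/Day 2-1.py | is_mirrored_sequence
-- ===== SOURCE A (Python) =====
-- def is_mirrored_sequence(num):
--     s = str(num)
--     n = len(s)
--     for l in range(1, n // 2 + 1):
--         if n % l == 0:
--             pattern = s[:n // 2]
--             if pattern * 2 == s:
--                 return True
--     return False
-- ===== SOURCE B (Python) =====
-- def is_mirrored_sequence(num):
--     # Pure arithmetic: str(num) is a doubled half iff num >= 0, its digit
--     # count d is even, and the top half digits equal the bottom half digits,
--     # i.e. num // 10**(d//2) == num % 10**(d//2).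
--     if num < 0:
--         return False
--     d = 1
--     p = 10
--     while p <= num:
--         d += 1
--         p *= 10
--     if d % 2 == 1:
--         return False
--     m = 10 ** (d // 2)
--     return num // m == num % m
-- ===== Notes on version B (the rewrite author's own statement) =====
-- stated objective: alternative
-- what changed: Replaces A's string-based divisor loop (building s[:n//2]*2 and comparing with s for each candidate length) by pure integer arithmetic with no string at all: reject negatives, count digits d with a multiply-by-10 loop, require d even, and test num // 10**(d//2) == num % 10**(d//2).
import Mathlib
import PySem

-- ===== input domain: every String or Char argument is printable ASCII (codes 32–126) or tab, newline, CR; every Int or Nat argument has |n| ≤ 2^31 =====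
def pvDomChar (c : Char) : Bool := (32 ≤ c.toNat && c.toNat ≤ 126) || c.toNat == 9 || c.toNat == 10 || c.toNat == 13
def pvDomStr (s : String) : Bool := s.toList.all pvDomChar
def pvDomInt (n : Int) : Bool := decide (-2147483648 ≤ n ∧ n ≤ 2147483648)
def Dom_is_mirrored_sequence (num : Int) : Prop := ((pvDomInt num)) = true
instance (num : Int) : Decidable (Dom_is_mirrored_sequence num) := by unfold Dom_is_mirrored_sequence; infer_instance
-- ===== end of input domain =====

-- B drops A's string construction entirely: it rejects negatives, counts the digits of num with a
-- multiply-by-10 loop and tests num // 10**(d//2) == num % 10**(d//2) by integer arithmetic (alternative).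

-- ===== PORT A =====
-- for l in range(1, n//2+1): if n % l == 0 and s[:n//2]*2 == s: return True  (early return ported as foldl with ||)
def is_mirrored_sequence (num : Int) : Bool :=
  let s := PySem.Int.toChars num
  let n : Int := s.length
  (PySem.List.pyRange 1 (PySem.Int.floordiv n 2 + 1) 1).foldl
    (fun acc l =>
      acc || ((PySem.Int.mod n l == 0) &&
        (PySem.List.slice s none (some (PySem.Int.floordiv n 2)) ++
         PySem.List.slice s none (some (PySem.Int.floordiv n 2)) == s)))
    false

-- ===== PORT B =====
-- the while-loop 'while p <= num: d += 1; p *= 10' of Source B (runs only when num >= 0, so on Nat;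
-- the '1 ≤ p' conjunct only makes the recursion terminate and always holds: p starts at 10)
def pvDigitCount (n : Nat) (d : Nat) (p : Nat) : Nat :=
  if 1 ≤ p ∧ p ≤ n then pvDigitCount n (d + 1) (p * 10) else d
termination_by n + 1 - p
decreasing_by
  rename_i h
  have : p < p * 10 := by nlinarith [h.1]
  omega

-- if num < 0: False; count digits d; if d odd: False; return num // 10**(d//2) == num % 10**(d//2)
-- (num ≥ 0 here, so Python's // % ** on it are exactly Nat's / % ^)
def is_mirrored_sequence_alt (num : Int) : Bool :=
  if num < 0 then false
  else
    let n := num.toNat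
    let d := pvDigitCount n 1 10
    if d % 2 == 1 then false
    else
      let m := 10 ^ (d / 2)
      n / m == n % m

-- ===== PRECONDITION & SPEC =====
def Spec_is_mirrored_sequence (num : Int) (out : Bool) : Prop := out = is_mirrored_sequence_alt num
instance (num : Int) (out : Bool) : Decidable (Spec_is_mirrored_sequence num out) := by unfold Spec_is_mirrored_sequence; infer_instance

-- ===== CLAIM (what is proved, stated in full; the proofs are below) =====
def Claim_equal_is_mirrored_sequence : Prop := ∀ (num : Int), Dom_is_mirrored_sequence num → Spec_is_mirrored_sequence num (is_mirrored_sequence num)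

-- ===== LEMMAS AND PROOFS =====

-- A's test 's[:n//2]*2 == s' on a char list
def pvDoubled (cs : List Char) : Bool :=
  (cs.take (cs.length / 2) ++ cs.take (cs.length / 2)) == cs

-- str(num) is never empty
lemma toDigitsCore_len (b : Nat) : ∀ (f n : Nat) (ds : List Char), ds.length ≤ (Nat.toDigitsCore b f n ds).length := by
  intro f
  induction f with
  | zero => intro n ds; simp [Nat.toDigitsCore]
  | succ f ih =>
    intro n ds
    simp only [Nat.toDigitsCore]
    split
    · simp
    · exact le_trans (by simp) (ih _ _)

lemma toChars_ne_nil (num : Int) : PySem.Int.toChars num ≠ [] := by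
  unfold PySem.Int.toChars
  split
  · simp
  · unfold Nat.toDigits
    intro h
    simp only [Nat.toDigitsCore] at h
    split at h
    · simp at h
    · have := toDigitsCore_len 10 num.toNat (num.toNat/10) [(num.toNat % 10).digitChar]
      rw [h] at this; simp at this

lemma foldl_or (f : Int → Bool) : ∀ (L : List Int) (b : Bool),
    L.foldl (fun acc l => acc || f l) b = (b || L.any f) := by
  intro L
  induction L with
  | nil => simp
  | cons x t ih => intro b; simp [List.foldl_cons, ih, Bool.or_assoc]

-- A returns True iff its doubled-half test holds (the divisor l = 1 always qualifies)
lemma A_eq_doubled (num : Int) : is_mirrored_sequence num = pvDoubled (PySem.Int.toChars num) := by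
  unfold is_mirrored_sequence pvDoubled
  have hne := toChars_ne_nil num
  set cs := PySem.Int.toChars num with hcs
  have hn1 : 1 ≤ cs.length := List.length_pos_iff.mpr hne
  have hfd : PySem.Int.floordiv (cs.length : Int) 2 = ((cs.length / 2 : Nat) : Int) := by
    exact_mod_cast PySem.Int.floordiv_natCast cs.length 2
  simp only [hfd, PySem.List.slice_to_natCast]
  rw [foldl_or, Bool.false_or]
  rw [Bool.eq_iff_iff, List.any_eq_true, beq_iff_eq]
  constructor
  · rintro ⟨l, _, hf⟩
    simp only [Bool.and_eq_true, beq_iff_eq] at hf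
    exact hf.2
  · intro hb
    have hlen := congrArg List.length hb
    simp only [List.length_append, List.length_take,
      Nat.min_eq_left (Nat.div_le_self cs.length 2)] at hlen
    refine ⟨1, ?_, ?_⟩
    · rw [PySem.List.mem_pyRange_one]
      refine ⟨le_refl _, ?_⟩
      have : 1 ≤ cs.length / 2 := by omega
      push_cast
      omega
    · simp only [Bool.and_eq_true, beq_iff_eq]
      exact ⟨by rw [PySem.Int.mod_eq_zero_iff_dvd]; exact one_dvd _, hb⟩

-- bridge: Nat.toDigits is the reversed base-10 digit list rendered with digitChar
lemma toDigitsCore_eq_digits : ∀ (f n : Nat) (ds : List Char), 1 ≤ n → n ≤ f →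
    Nat.toDigitsCore 10 f n ds = (Nat.digits 10 n).reverse.map Nat.digitChar ++ ds := by
  intro f
  induction f with
  | zero => intro n ds h1 h2; omega
  | succ f ih =>
    intro n ds h1 h2
    simp only [Nat.toDigitsCore]
    by_cases hd : n / 10 = 0
    · rw [if_pos hd, Nat.digits_def' (by norm_num : (1:ℕ) < 10) h1, hd]
      simp
    · rw [if_neg hd]
      have h1' : 1 ≤ n / 10 := Nat.pos_of_ne_zero hd
      have h2' : n / 10 ≤ f := by
        have := Nat.div_lt_self h1 (by norm_num : 1 < 10); omega
      rw [ih (n / 10) _ h1' h2', Nat.digits_def' (by norm_num : (1:ℕ) < 10) h1]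
      simp

lemma toDigits_eq (n : Nat) (h : 1 ≤ n) :
    Nat.toDigits 10 n = (Nat.digits 10 n).reverse.map Nat.digitChar := by
  unfold Nat.toDigits
  rw [toDigitsCore_eq_digits (n+1) n [] h (by omega)]
  simp

lemma digitChar_inj10 : ∀ a < 10, ∀ b < 10, Nat.digitChar a = Nat.digitChar b → a = b := by decide

lemma digitChar_ne_dash : ∀ d < 10, Nat.digitChar d ≠ '-' := by decide

lemma map_digitChar_inj : ∀ (l1 l2 : List Nat), (∀ x ∈ l1, x < 10) → (∀ x ∈ l2, x < 10) →
    l1.map Nat.digitChar = l2.map Nat.digitChar → l1 = l2 := by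
  intro l1
  induction l1 with
  | nil => intro l2 _ _ h; cases l2 with
    | nil => rfl
    | cons y t2 => simp at h
  | cons x t ih =>
    intro l2 h1 h2 h
    cases l2 with
    | nil => simp at h
    | cons y t2 =>
      simp only [List.map_cons, List.cons.injEq] at h
      have hx := digitChar_inj10 x (h1 x (by simp)) y (h2 y (by simp)) h.1
      rw [hx, ih t2 (fun z hz => h1 z (by simp [hz])) (fun z hz => h2 z (by simp [hz])) h.2]

lemma ofDigits_inj : ∀ (l1 l2 : List Nat), l1.length = l2.length → (∀ x ∈ l1, x < 10) →
    (∀ x ∈ l2, x < 10) → Nat.ofDigits 10 l1 = Nat.ofDigits 10 l2 → l1 = l2 := by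
  intro l1
  induction l1 with
  | nil => intro l2 hl _ _ _; cases l2 with
    | nil => rfl
    | cons y t2 => simp at hl
  | cons x t ih =>
    intro l2 hl hx hy hv
    cases l2 with
    | nil => simp at hl
    | cons y t2 =>
      simp only [Nat.ofDigits_cons] at hv
      have hx0 : x < 10 := hx x (by simp)
      have hy0 : y < 10 := hy y (by simp)
      have hxy : x = y ∧ Nat.ofDigits 10 t = Nat.ofDigits 10 t2 := by omega
      rw [hxy.1, ih t2 (by simpa using hl) (fun z hz => hx z (by simp [hz]))
        (fun z hz => hy z (by simp [hz])) hxy.2]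

lemma div_pow_eq_ofDigits_drop (n h : Nat) (hh : h ≤ (Nat.digits 10 n).length) :
    n / 10 ^ h = Nat.ofDigits 10 ((Nat.digits 10 n).drop h) := by
  have h0 : Nat.ofDigits 10 ((Nat.digits 10 n).take h ++ (Nat.digits 10 n).drop h)
      = Nat.ofDigits 10 ((Nat.digits 10 n).take h)
        + 10 ^ ((Nat.digits 10 n).take h).length * Nat.ofDigits 10 ((Nat.digits 10 n).drop h) :=
    Nat.ofDigits_append
  rw [List.take_append_drop, Nat.ofDigits_digits, List.length_take, Nat.min_eq_left hh] at h0
  have hmod := Nat.self_mod_pow_eq_ofDigits_take (p := 10) h n (by norm_num)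
  have hlt : n % 10 ^ h < 10 ^ h := Nat.mod_lt _ (by positivity)
  rw [← hmod] at h0
  conv_lhs => rw [h0]
  rw [Nat.add_mul_div_left _ _ (by positivity), Nat.div_eq_of_lt hlt, zero_add]

-- the doubled-half test on the digit string of n ≥ 1, characterised arithmetically
lemma doubled_iff_arith (n : Nat) (_h1 : 1 ≤ n) :
    (pvDoubled ((Nat.digits 10 n).reverse.map Nat.digitChar) = true) ↔
      ((Nat.digits 10 n).length % 2 = 0 ∧
        n / 10 ^ ((Nat.digits 10 n).length / 2) = n % 10 ^ ((Nat.digits 10 n).length / 2)) := by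
  unfold pvDoubled
  rw [beq_iff_eq]
  set L := Nat.digits 10 n with hL
  set k := L.length with hk
  set M := L.map Nat.digitChar with hM
  have hMrev : L.reverse.map Nat.digitChar = M.reverse := List.map_reverse
  have hMlen : M.length = k := by simp [hM, hk]
  have hcslen : (L.reverse.map Nat.digitChar).length = k := by simp [hk]
  rw [hcslen]
  have hLlt : ∀ x ∈ L, x < 10 := fun x hx => Nat.digits_lt_base (by norm_num) hx
  have hdle : k / 2 ≤ k := Nat.div_le_self _ _
  have htdr : M.reverse.take (k / 2) = (M.drop (k - k / 2)).reverse := by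
    rw [List.take_reverse, hMlen]
  have hddr : M.reverse.drop (k / 2) = (M.take (k - k / 2)).reverse := by
    rw [List.drop_reverse, hMlen]
  constructor
  · intro heq
    have hlen := congrArg List.length heq
    simp only [List.length_append, List.length_take, hcslen, Nat.min_eq_left hdle] at hlen
    have heven : k % 2 = 0 := by omega
    have hkh : k - k / 2 = k / 2 := by omega
    refine ⟨heven, ?_⟩
    have hsplit := List.take_append_drop (k / 2) (L.reverse.map Nat.digitChar)
    have heq2 : (L.reverse.map Nat.digitChar).take (k / 2)
        = (L.reverse.map Nat.digitChar).drop (k / 2) :=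
      List.append_cancel_left (heq.trans hsplit.symm)
    rw [hMrev, htdr, hddr, hkh, List.reverse_inj] at heq2
    have heq3 : (L.drop (k / 2)).map Nat.digitChar = (L.take (k / 2)).map Nat.digitChar := by
      rw [List.map_drop, List.map_take]; exact heq2
    have heq4 : L.drop (k / 2) = L.take (k / 2) :=
      map_digitChar_inj _ _ (fun x hx => hLlt x (List.mem_of_mem_drop hx))
        (fun x hx => hLlt x (List.mem_of_mem_take hx)) heq3
    rw [div_pow_eq_ofDigits_drop n (k / 2) hdle,
      Nat.self_mod_pow_eq_ofDigits_take (k / 2) n (by norm_num), ← hL, heq4]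
  · rintro ⟨heven, harith⟩
    have hkh : k - k / 2 = k / 2 := by omega
    have hval : Nat.ofDigits 10 (L.drop (k / 2)) = Nat.ofDigits 10 (L.take (k / 2)) := by
      rw [← div_pow_eq_ofDigits_drop n (k / 2) hdle,
        ← Nat.self_mod_pow_eq_ofDigits_take (k / 2) n (by norm_num)]
      exact harith
    have heq4 : L.drop (k / 2) = L.take (k / 2) :=
      ofDigits_inj _ _ (by simp [hk]; omega)
        (fun x hx => hLlt x (List.mem_of_mem_drop hx))
        (fun x hx => hLlt x (List.mem_of_mem_take hx)) hval
    have heq2 : (L.reverse.map Nat.digitChar).take (k / 2)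
        = (L.reverse.map Nat.digitChar).drop (k / 2) := by
      rw [hMrev, htdr, hddr, hkh, List.reverse_inj, ← List.map_drop, ← List.map_take, heq4]
    conv_rhs => rw [← List.take_append_drop (k / 2) (L.reverse.map Nat.digitChar)]
    rw [heq2]

-- for negative num the string starts with '-', which can never sit at the start of the second half
lemma doubled_neg (num : Int) (hneg : num < 0) : pvDoubled (PySem.Int.toChars num) = false := by
  have hcs : PySem.Int.toChars num = '-' :: Nat.toDigits 10 num.natAbs := by
    unfold PySem.Int.toChars; rw [if_pos hneg]
  unfold pvDoubled
  rw [beq_eq_false_iff_ne]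
  intro heq
  set cs := PySem.Int.toChars num with hcsdef
  set hh := cs.length / 2 with hhdef
  have hk : cs.length = (Nat.toDigits 10 num.natAbs).length + 1 := by rw [hcs]; simp
  have hlen := congrArg List.length heq
  simp only [List.length_append, List.length_take] at hlen
  have hh1 : 1 ≤ hh := by omega
  have htk : (cs.take hh).length = hh := by
    rw [List.length_take]; omega
  have e1 : (cs.take hh ++ cs.take hh)[hh]? = cs[hh]? := by rw [heq]
  rw [List.getElem?_append_right (by omega : (cs.take hh).length ≤ hh), htk, Nat.sub_self] at e1
  have e2 : (cs.take hh)[0]? = cs[0]? := by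
    rw [List.getElem?_take_of_lt (by omega : 0 < hh)]
  rw [e2, hcs] at e1
  simp only [List.getElem?_cons_zero] at e1
  obtain ⟨j, hj⟩ : ∃ j, hh = j + 1 := ⟨hh - 1, by omega⟩
  rw [hj, List.getElem?_cons_succ] at e1
  have hmem : '-' ∈ Nat.toDigits 10 num.natAbs := by
    exact List.mem_of_getElem? e1.symm
  have hab : 1 ≤ num.natAbs := by omega
  rw [toDigits_eq _ hab] at hmem
  obtain ⟨d, hd, hdc⟩ := List.mem_map.mp hmem
  exact digitChar_ne_dash d (Nat.digits_lt_base (by norm_num) (List.mem_reverse.mp hd)) hdc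

lemma pvDigitCount_unfold (n d p : Nat) :
    pvDigitCount n d p = if 1 ≤ p ∧ p ≤ n then pvDigitCount n (d + 1) (p * 10) else d := by
  rw [pvDigitCount]

lemma pvDigitCount_eq_aux : ∀ (m n p d : Nat), n + 1 - p ≤ m → 1 ≤ p →
    pvDigitCount n d p = d + (Nat.digits 10 (n / p)).length := by
  intro m
  induction m with
  | zero =>
    intro n p d hm hp
    rw [pvDigitCount_unfold, if_neg (by omega)]
    have hz : n / p = 0 := Nat.div_eq_of_lt (by omega)
    simp [hz]
  | succ m ih =>
    intro n p d hm hp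
    rw [pvDigitCount_unfold]
    by_cases hc : p ≤ n
    · rw [if_pos ⟨hp, hc⟩]
      have hlt : p < p * 10 := by nlinarith
      rw [ih n (p * 10) (d + 1) (by omega) (by omega)]
      have hq : 1 ≤ n / p := (Nat.one_le_div_iff (by omega)).mpr hc
      rw [← Nat.div_div_eq_div_mul, Nat.digits_def' (by norm_num : (1:ℕ) < 10) hq]
      simp only [List.length_cons]
      omega
    · rw [if_neg (by tauto)]
      have hz : n / p = 0 := Nat.div_eq_of_lt (by omega)
      simp [hz]

lemma pvDigitCount_len (n : Nat) (h : 1 ≤ n) :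
    pvDigitCount n 1 10 = (Nat.digits 10 n).length := by
  rw [pvDigitCount_eq_aux (n + 1 - 10) n 10 1 le_rfl (by norm_num)]
  rw [Nat.digits_def' (by norm_num : (1:ℕ) < 10) h]
  simp only [List.length_cons]
  omega

lemma ab_eq (num : Int) : is_mirrored_sequence num = is_mirrored_sequence_alt num := by
  rw [A_eq_doubled]
  unfold is_mirrored_sequence_alt
  by_cases hneg : num < 0
  · rw [if_pos hneg, doubled_neg num hneg]
  · rw [if_neg hneg]
    by_cases h0 : num = 0
    · subst h0
      have hd : pvDigitCount 0 1 10 = 1 := by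
        rw [pvDigitCount_unfold]; norm_num
      simp only [Int.toNat_zero, hd]
      decide
    · have hn : 1 ≤ num.toNat := by omega
      have hcs : PySem.Int.toChars num = (Nat.digits 10 num.toNat).reverse.map Nat.digitChar := by
        unfold PySem.Int.toChars
        rw [if_neg (by omega)]
        exact toDigits_eq _ hn
      rw [hcs]
      show pvDoubled ((Nat.digits 10 num.toNat).reverse.map Nat.digitChar)
          = (if pvDigitCount num.toNat 1 10 % 2 == 1 then false
             else (num.toNat / 10 ^ (pvDigitCount num.toNat 1 10 / 2)
               == num.toNat % 10 ^ (pvDigitCount num.toNat 1 10 / 2)))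
      rw [pvDigitCount_len num.toNat hn]
      set k := (Nat.digits 10 num.toNat).length with hk
      by_cases hpar : k % 2 = 1
      · rw [if_pos (by simpa using hpar)]
        cases hD : pvDoubled ((Nat.digits 10 num.toNat).reverse.map Nat.digitChar) with
        | false => rfl
        | true =>
          have := ((doubled_iff_arith num.toNat hn).mp hD).1
          omega
      · rw [if_neg (by simpa using hpar)]
        rw [Bool.eq_iff_iff, beq_iff_eq, doubled_iff_arith num.toNat hn]
        constructor
        · exact fun h => h.2
        · exact fun h => ⟨by omega, h⟩

-- ===== VERDICT (by name: the statement is the Claim_ definition above) =====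
theorem is_mirrored_sequence_spec : Claim_equal_is_mirrored_sequence := by
  intro num _
  unfold Spec_is_mirrored_sequence
  exact ab_eq num
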